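-- pv_equiv track=rewrite | github.com/aleksiheikkila/AdventOfCode2022 | day_3/Rucksack_Reorganization.py | find_group_badge
-- ===== SOURCE A (Python) =====
-- def find_group_badge(lines: list[str]) -> str:
--     assert len(lines) == 3
--
--     for i, line in enumerate(lines):
--         if i == 0:
--             common_elements = set(line.strip())
--         else:
--             common_elements = common_elements.intersection(set(line.strip()))
--
--     assert len(common_elements) == 1, common_elements
--     return common_elements.pop()
-- ===== SOURCE B (Python) =====
-- def find_group_badge(lines: list[str]) -> str:
--     assert len(lines) == 3
--
--     tally = {}
--     for line in lines:
--         for c in set(line.strip()):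
--             tally[c] = tally.get(c, 0) + 1
--
--     common_elements = {c for c, v in tally.items() if v == 3}
--     assert len(common_elements) == 1, common_elements
--     return common_elements.pop()
-- ===== Notes on version B (the rewrite author's own statement) =====
-- stated objective: alternative
-- what changed: Replaces A's iterative pairwise set-intersection with a single character-frequency table accumulated over the three per-line character sets, then selects the characters whose tally equals 3.
import Mathlib
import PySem

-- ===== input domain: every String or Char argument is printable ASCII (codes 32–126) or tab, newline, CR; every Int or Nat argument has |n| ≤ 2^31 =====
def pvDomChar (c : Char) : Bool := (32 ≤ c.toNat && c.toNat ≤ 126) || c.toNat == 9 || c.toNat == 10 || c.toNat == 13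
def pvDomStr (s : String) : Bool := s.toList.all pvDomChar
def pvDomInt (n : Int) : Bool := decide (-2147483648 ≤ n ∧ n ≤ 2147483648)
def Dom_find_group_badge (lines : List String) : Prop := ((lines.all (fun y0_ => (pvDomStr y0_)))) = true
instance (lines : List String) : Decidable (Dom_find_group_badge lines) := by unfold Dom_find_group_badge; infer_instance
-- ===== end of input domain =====

-- B replaces A's iterative pairwise set-intersection with a frequency table over the three
-- per-line character sets (tally == 3 = common to all three); same cost, different decomposition.

-- ===== PORT A =====
-- A: enumerate the lines; on i==0 start from set(line.strip()), afterwards intersect;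
-- then return the single element of the resulting singleton set (the asserts are Pre_'s job).
def find_group_badge (lines : List String) : String :=
  let st := (PySem.List.enumerate lines).foldl
    (fun (acc : PySem.Set Char) p =>
      if p.1 == 0 then PySem.Set.ofList (PySem.Chars.strip p.2.toList)
      else PySem.Set.inter acc (PySem.Set.ofList (PySem.Chars.strip p.2.toList)))
    PySem.Set.empty
  if st.length == 1 then String.ofList st   -- common_elements.pop() on the asserted singleton
  else ""                                    -- assert len(common_elements) == 1 fails: outside Pre_

-- ===== PORT B =====
-- B: accumulate tally[c] = tally.get(c, 0) + 1 over each line's character set,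
-- then take the set of characters whose tally equals 3, then pop the singleton.
def find_group_badge_alt (lines : List String) : String :=
  let tally := lines.foldl
    (fun (d : PySem.Dict Char Int) line =>
      (PySem.Set.ofList (PySem.Chars.strip line.toList)).foldl
        (fun d c => d.insert c (d.getD c 0 + 1)) d)
    PySem.Dict.empty
  let common : PySem.Set Char :=
    PySem.Set.ofList ((tally.items.filter (fun p => p.2 == 3)).map Prod.fst)
  if common.length == 1 then String.ofList common  -- common_elements.pop() on the asserted singleton
  else ""                                    -- assert len(common_elements) == 1 fails: outside Pre_

-- ===== PRECONDITION & SPEC =====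
-- the distinct characters of the first line that also occur in the other two lines (after strip)
def pvCommon_find_group_badge (lines : List String) : List Char :=
  (PySem.List.dedup (PySem.Chars.strip (lines.getD 0 "").toList)).filter
    (fun c => (PySem.Chars.strip (lines.getD 1 "").toList).contains c &&
              (PySem.Chars.strip (lines.getD 2 "").toList).contains c)

-- Pre_ excludes exactly the inputs on which A raises AssertionError: lists whose length is not 3,
-- and triples whose three stripped lines do not have exactly one character in common.
def Pre_find_group_badge (lines : List String) : Prop :=
  lines.length = 3 ∧ (pvCommon_find_group_badge lines).length = 1
instance (lines : List String) : Decidable (Pre_find_group_badge lines) := by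
  unfold Pre_find_group_badge; infer_instance

def pvWitness_find_group_badge : List String := ["abc", " bd ", "cbz"]

def Spec_find_group_badge (lines : List String) (out : String) : Prop := out = find_group_badge_alt lines
instance (lines : List String) (out : String) : Decidable (Spec_find_group_badge lines out) := by unfold Spec_find_group_badge; infer_instance

-- ===== CLAIM (what is proved, stated in full; the proofs are below) =====
def Claim_equal_find_group_badge : Prop := ∀ (lines : List String), Dom_find_group_badge lines → Pre_find_group_badge lines → Spec_find_group_badge lines (find_group_badge lines)

-- ===== LEMMAS AND PROOFS =====

-- a Nodup list whose members are exactly {c} is [c]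
theorem pv_singleton_of_nodup (l : List Char) (c : Char) (h : l.Nodup)
    (hm : ∀ x, x ∈ l ↔ x = c) : l = [c] :=
  List.perm_singleton.mp ((List.perm_ext_iff_of_nodup h (by simp)).mpr (by simp [hm]))

-- A's intersection chain on a 3-list
theorem pv_A_fold (l0 l1 l2 : String) :
    (PySem.List.enumerate [l0, l1, l2]).foldl
      (fun (acc : PySem.Set Char) p =>
        if p.1 == 0 then PySem.Set.ofList (PySem.Chars.strip p.2.toList)
        else PySem.Set.inter acc (PySem.Set.ofList (PySem.Chars.strip p.2.toList)))
      PySem.Set.empty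
    = PySem.Set.inter
        (PySem.Set.inter (PySem.Set.ofList (PySem.Chars.strip l0.toList))
          (PySem.Set.ofList (PySem.Chars.strip l1.toList)))
        (PySem.Set.ofList (PySem.Chars.strip l2.toList)) := by
  simp [PySem.List.enumerate_cons, PySem.List.enumerate_nil, List.foldl]

-- B's tally on a 3-list is Counter of the concatenated per-line sets
theorem pv_B_fold (l0 l1 l2 : String) :
    [l0, l1, l2].foldl
      (fun (d : PySem.Dict Char Int) line =>
        (PySem.Set.ofList (PySem.Chars.strip line.toList)).foldl
          (fun d c => d.insert c (d.getD c 0 + 1)) d)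
      PySem.Dict.empty
    = PySem.Dict.counter
        (PySem.Set.ofList (PySem.Chars.strip l0.toList) ++
         PySem.Set.ofList (PySem.Chars.strip l1.toList) ++
         PySem.Set.ofList (PySem.Chars.strip l2.toList)) := by
  simp only [List.foldl]
  rw [← PySem.Dict.foldl_insert_getD_add_one_eq_counter, List.foldl_append, List.foldl_append]

-- membership in B's "tally == 3" set
theorem pv_mem_common (cs : List Char) (x : Char) :
    x ∈ PySem.Set.ofList
        (((PySem.Dict.counter cs).items.filter (fun p => p.2 == 3)).map Prod.fst)
      ↔ x ∈ cs ∧ cs.count x = 3 := by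
  simp [PySem.Set.mem_ofList, PySem.Dict.items_counter, List.mem_map, List.mem_filter]
  intro _
  exact ⟨fun h => by exact_mod_cast h, fun h => by exact_mod_cast h⟩

-- a Nodup list counts 1 on members, 0 elsewhere; three of them sum to 3 iff member of all
theorem pv_count3 (a b c : List Char) (ha : a.Nodup) (hb : b.Nodup) (hc : c.Nodup) (x : Char) :
    (a ++ b ++ c).count x = 3 ↔ x ∈ a ∧ x ∈ b ∧ x ∈ c := by
  have cnt : ∀ (l : List Char), l.Nodup → l.count x = if x ∈ l then 1 else 0 := by
    intro l hl
    by_cases h : x ∈ l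
    · simp [h, List.count_eq_one_of_mem hl h]
    · simp [h, List.count_eq_zero.mpr h]
  rw [List.count_append, List.count_append, cnt a ha, cnt b hb, cnt c hc]
  by_cases h1 : x ∈ a <;> by_cases h2 : x ∈ b <;> by_cases h3 : x ∈ c <;> simp [h1, h2, h3]

theorem find_group_badge_spec_aux (l0 l1 l2 : String)
    (hpre : (pvCommon_find_group_badge [l0, l1, l2]).length = 1) :
    find_group_badge [l0, l1, l2] = find_group_badge_alt [l0, l1, l2] := by
  -- the common character
  obtain ⟨c, hc⟩ := List.length_eq_one_iff.mp hpre
  have hmem : ∀ x : Char,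
      (x ∈ PySem.Chars.strip l0.toList ∧ x ∈ PySem.Chars.strip l1.toList ∧
       x ∈ PySem.Chars.strip l2.toList) ↔ x = c := by
    intro x
    have : x ∈ pvCommon_find_group_badge [l0, l1, l2] ↔ x = c := by rw [hc]; simp
    rw [← this]
    simp [pvCommon_find_group_badge, List.mem_filter, List.getD]
  -- A's side
  have hA : find_group_badge [l0, l1, l2] = String.ofList [c] := by
    have hst : PySem.Set.inter
        (PySem.Set.inter (PySem.Set.ofList (PySem.Chars.strip l0.toList))
          (PySem.Set.ofList (PySem.Chars.strip l1.toList)))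
        (PySem.Set.ofList (PySem.Chars.strip l2.toList)) = [c] := by
      apply pv_singleton_of_nodup _ c
      · exact PySem.Set.nodup_inter _ _
          (PySem.Set.nodup_inter _ _ (PySem.Set.nodup_ofList _))
      · intro x
        rw [PySem.Set.mem_inter, PySem.Set.mem_inter]
        simp only [PySem.Set.mem_ofList]
        rw [← hmem x]; tauto
    simp only [find_group_badge]
    rw [pv_A_fold, hst]
    rfl
  -- B's side
  have hB : find_group_badge_alt [l0, l1, l2] = String.ofList [c] := by
    have hcm : PySem.Set.ofList
        ((((PySem.Dict.counter
            (PySem.Set.ofList (PySem.Chars.strip l0.toList) ++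
             PySem.Set.ofList (PySem.Chars.strip l1.toList) ++
             PySem.Set.ofList (PySem.Chars.strip l2.toList))).items.filter
              (fun p => p.2 == 3)).map Prod.fst)) = [c] := by
      apply pv_singleton_of_nodup _ c
      · exact PySem.Set.nodup_ofList _
      · intro x
        rw [pv_mem_common,
            pv_count3 _ _ _ (PySem.Set.nodup_ofList _) (PySem.Set.nodup_ofList _)
              (PySem.Set.nodup_ofList _)]
        simp only [PySem.Set.mem_ofList, List.mem_append]
        rw [← hmem x]; tauto
    simp only [find_group_badge_alt]
    rw [pv_B_fold, hcm]
    rfl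
  rw [hA, hB]

-- ===== VERDICT (by name: the statement is the Claim_ definition above) =====
theorem find_group_badge_spec : Claim_equal_find_group_badge := by
  intro lines _ hpre
  obtain ⟨hlen, hone⟩ := hpre
  match lines, hlen with
  | [l0, l1, l2], _ =>
    show find_group_badge [l0, l1, l2] = find_group_badge_alt [l0, l1, l2]
    exact find_group_badge_spec_aux l0 l1 l2 hone
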